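-- pv_equiv track=rewrite | github.com/manishelf/depc.py | literals.py | sequence_to_decimal
-- ===== SOURCE A (Python) =====
-- def sequence_to_decimal(seq, base):
--     res = 0
--     units = 1
--     inp = seq.copy()
--     inp.reverse()
--     for i in range(len(inp)):
--         res += inp[i]*(base**i)*units
--     units *= 10
--     return res
-- ===== SOURCE B (Python) =====
-- def sequence_to_decimal(seq, base):
--     res = 0
--     for d in seq:
--         res = res * base + d
--     return res
-- ===== Notes on version B (the rewrite author's own statement) =====
-- stated objective: faster
-- what changed: Replaces the reverse-then-sum-of-powers loop (recomputing base**i each iteration) with a single left-to-right Horner fold res = res*base + d.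
import Mathlib
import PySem

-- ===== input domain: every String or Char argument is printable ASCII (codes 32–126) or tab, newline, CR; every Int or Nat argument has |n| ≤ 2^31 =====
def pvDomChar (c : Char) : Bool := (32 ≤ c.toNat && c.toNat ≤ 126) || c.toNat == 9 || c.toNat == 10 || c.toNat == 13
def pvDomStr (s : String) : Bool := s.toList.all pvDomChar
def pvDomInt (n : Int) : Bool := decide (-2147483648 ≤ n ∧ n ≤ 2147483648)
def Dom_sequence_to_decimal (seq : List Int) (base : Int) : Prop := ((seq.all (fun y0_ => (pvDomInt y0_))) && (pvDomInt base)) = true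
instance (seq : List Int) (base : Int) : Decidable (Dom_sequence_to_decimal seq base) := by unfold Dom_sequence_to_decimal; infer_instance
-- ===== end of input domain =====

-- B replaces A's reverse + per-digit base**i power sum with a single Horner fold (faster: fewer multiplications).
-- ===== PORT A =====
-- res = 0; units = 1; inp = seq reversed; for i in range(len(inp)): res += inp[i]*(base**i)*units; return res
def sequence_to_decimal (seq : List Int) (base : Int) : Int :=
  let units : Int := 1
  let inp := seq.reverse
  (List.range inp.length).foldl (fun res i => res + inp.getD i 0 * base ^ i * units) 0

-- ===== PORT B =====
def sequence_to_decimal_alt (seq : List Int) (base : Int) : Int :=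
  seq.foldl (fun res d => res * base + d) 0

-- ===== PRECONDITION & SPEC =====
def Spec_sequence_to_decimal (seq : List Int) (base : Int) (out : Int) : Prop := out = sequence_to_decimal_alt seq base
instance (seq : List Int) (base : Int) (out : Int) : Decidable (Spec_sequence_to_decimal seq base out) := by unfold Spec_sequence_to_decimal; infer_instance

-- ===== CLAIM (what is proved, stated in full; the proofs are below) =====
def Claim_equal_sequence_to_decimal : Prop := ∀ (seq : List Int) (base : Int), Dom_sequence_to_decimal seq base → Spec_sequence_to_decimal seq base (sequence_to_decimal seq base)

-- ===== LEMMAS AND PROOFS =====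

-- A's loop over an appended final digit
lemma sumA_append (l : List Int) (d base : Int) :
    (List.range (l ++ [d]).length).foldl (fun res i => res + (l ++ [d]).getD i 0 * base ^ i * 1) 0
      = (List.range l.length).foldl (fun res i => res + l.getD i 0 * base ^ i * 1) 0
        + d * base ^ l.length := by
  have hlen : (l ++ [d]).length = l.length + 1 := by simp
  rw [hlen, List.range_succ, List.foldl_append]
  have hcongr :
      (List.range l.length).foldl (fun res i => res + (l ++ [d]).getD i 0 * base ^ i * 1) 0
        = (List.range l.length).foldl (fun res i => res + l.getD i 0 * base ^ i * 1) 0 := by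
    apply List.foldl_ext
    intro a i hi
    have hlt : i < l.length := List.mem_range.mp hi
    rw [List.getD_append _ _ _ _ hlt]
  rw [hcongr]
  have hget : (l ++ [d]).getD l.length 0 = d := by
    simp
  simp only [List.foldl_cons, List.foldl_nil, hget]
  ring

-- Horner fold with an arbitrary accumulator
lemma horner_acc (base : Int) (l : List Int) : ∀ (a : Int),
    l.foldl (fun res d => res * base + d) a
      = a * base ^ l.length + l.foldl (fun res d => res * base + d) 0 := by
  induction l with
  | nil => intro a; simp
  | cons d t ih =>
      intro a
      simp only [List.foldl_cons, List.length_cons]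
      rw [ih (a * base + d), ih (0 * base + d)]
      ring

lemma main_eq (seq : List Int) (base : Int) :
    sequence_to_decimal seq base = sequence_to_decimal_alt seq base := by
  unfold sequence_to_decimal sequence_to_decimal_alt
  induction seq with
  | nil => simp
  | cons d t ih =>
      simp only [List.reverse_cons]
      rw [sumA_append, ih]
      simp only [List.foldl_cons]
      rw [horner_acc base t (0 * base + d)]
      simp
      ring

-- ===== VERDICT (by name: the statement is the Claim_ definition above) =====
theorem sequence_to_decimal_spec : Claim_equal_sequence_to_decimal := by
  intro seq base _
  unfold Spec_sequence_to_decimal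
  exact main_eq seq base
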